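-- pv_equiv track=rewrite | github.com/Terence1975-Coder/geopulse | backend/intel/scoring_service.py | _build_opportunity_explanations
-- ===== SOURCE A (Python) =====
-- from typing import Any, Dict, List, Tuple
--
-- def _build_opportunity_explanations(opportunity_signals: List[Dict[str, Any]]) -> List[str]:
--     explanations: List[str] = []
--
--     if any("resilience" in str(s.get("cluster_tag", "")).lower() for s in opportunity_signals):
--         explanations.append("Resilience demand is rising, creating room for higher-value advisory and implementation offers.")
--
--     if any("timing" in str(s.get("cluster_tag", "")).lower() for s in opportunity_signals):
--         explanations.append("Market timing conditions suggest a nearer-term commercial opening rather than a distant watch item.")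
--
--     if any("competitor" in str(s.get("summary", "")).lower() for s in opportunity_signals):
--         explanations.append("Competitor weakness signals are improving the odds of differentiated offer capture.")
--
--     if not explanations and opportunity_signals:
--         explanations.append("Positive signals are aligning around demand, timing, and commercial response readiness.")
--
--     return explanations[:3]
-- ===== SOURCE B (Python) =====
-- from typing import Any, Dict, List, Tuple
--
-- _RULES = [
--     ("cluster_tag", "resilience",
--      "Resilience demand is rising, creating room for higher-value advisory and implementation offers."),
--     ("cluster_tag", "timing",
--      "Market timing conditions suggest a nearer-term commercial opening rather than a distant watch item."),
--     ("summary", "competitor",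
--      "Competitor weakness signals are improving the odds of differentiated offer capture."),
-- ]
--
-- _DEFAULT = "Positive signals are aligning around demand, timing, and commercial response readiness."
--
--
-- def _build_opportunity_explanations(opportunity_signals: List[Dict[str, Any]]) -> List[str]:
--     # One traversal of the signals; each signal marks the rules it triggers in a set
--     # of rule indices, and the messages are emitted afterwards in rule order.
--     matched = set()
--     for s in opportunity_signals:
--         for i, (field, needle, _msg) in enumerate(_RULES):
--             if needle in str(s.get(field, "")).lower():
--                 matched.add(i)
--     explanations = [msg for i, (_f, _n, msg) in enumerate(_RULES) if i in matched]
--     if not explanations and opportunity_signals: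
--         explanations = [_DEFAULT]
--     return explanations[:3]
-- ===== Notes on version B (the rewrite author's own statement) =====
-- stated objective: alternative
-- what changed: B is table-driven: the three (field, needle, message) rules live in a data table; a single nested pass over signals x rules collects the indices of triggered rules into a set, and the explanation list is then emitted by filtering the rule table against that set, instead of A's three hand-written any() scans with hard-coded appends.
import Mathlib
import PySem

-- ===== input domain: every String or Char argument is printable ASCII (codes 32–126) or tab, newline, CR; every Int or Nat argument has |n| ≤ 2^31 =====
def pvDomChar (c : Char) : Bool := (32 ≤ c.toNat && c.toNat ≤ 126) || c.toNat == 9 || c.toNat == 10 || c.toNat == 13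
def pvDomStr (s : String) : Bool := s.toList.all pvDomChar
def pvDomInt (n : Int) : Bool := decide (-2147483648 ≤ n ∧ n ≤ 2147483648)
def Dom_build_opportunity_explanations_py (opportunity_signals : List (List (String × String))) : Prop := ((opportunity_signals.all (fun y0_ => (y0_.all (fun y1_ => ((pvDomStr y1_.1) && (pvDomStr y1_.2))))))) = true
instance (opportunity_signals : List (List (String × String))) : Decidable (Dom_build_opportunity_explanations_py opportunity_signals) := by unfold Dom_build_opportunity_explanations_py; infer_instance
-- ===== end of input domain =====

-- B is table-driven: a rule table and one nested pass collecting triggered rule indices into a set,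
-- then the messages are emitted by filtering the table against that set (alternative decomposition; same return value).

-- shared primitive: s.get(k, "") on a dict given as an association list
def pvGet (s : List (String × String)) (k : String) : String :=
  (PySem.Dict.ofList s).getD k ""

-- ===== PORT A =====
def build_opportunity_explanations_py (opportunity_signals : List (List (String × String))) : List String :=
  let explanations : List String := []
  let explanations :=
    if opportunity_signals.any (fun s => PySem.Str.isIn "resilience" (PySem.Str.lower (pvGet s "cluster_tag"))) then
      explanations ++ ["Resilience demand is rising, creating room for higher-value advisory and implementation offers."]
    else explanations
  let explanations :=
    if opportunity_signals.any (fun s => PySem.Str.isIn "timing" (PySem.Str.lower (pvGet s "cluster_tag"))) then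
      explanations ++ ["Market timing conditions suggest a nearer-term commercial opening rather than a distant watch item."]
    else explanations
  let explanations :=
    if opportunity_signals.any (fun s => PySem.Str.isIn "competitor" (PySem.Str.lower (pvGet s "summary"))) then
      explanations ++ ["Competitor weakness signals are improving the odds of differentiated offer capture."]
    else explanations
  let explanations :=
    if explanations.isEmpty && !opportunity_signals.isEmpty then
      explanations ++ ["Positive signals are aligning around demand, timing, and commercial response readiness."]
    else explanations
  PySem.List.slice explanations none (some 3)

-- ===== PORT B =====
-- the rule table (field, needle, message) as in Source B
def pvRules : List (String × String × String) :=
  [("cluster_tag", "resilience",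
    "Resilience demand is rising, creating room for higher-value advisory and implementation offers."),
   ("cluster_tag", "timing",
    "Market timing conditions suggest a nearer-term commercial opening rather than a distant watch item."),
   ("summary", "competitor",
    "Competitor weakness signals are improving the odds of differentiated offer capture.")]

def build_opportunity_explanations_py_alt (opportunity_signals : List (List (String × String))) : List String :=
  let matched : PySem.Set Int :=
    opportunity_signals.foldl
      (fun m s =>
        (PySem.List.enumerate pvRules).foldl
          (fun m ir =>
            if PySem.Str.isIn ir.2.2.1 (PySem.Str.lower (pvGet s ir.2.1)) then PySem.Set.add m ir.1 else m)
          m)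
      PySem.Set.empty
  let explanations :=
    ((PySem.List.enumerate pvRules).filter (fun ir => PySem.Set.contains matched ir.1)).map (fun ir => ir.2.2.2)
  let explanations :=
    if explanations.isEmpty && !opportunity_signals.isEmpty then
      ["Positive signals are aligning around demand, timing, and commercial response readiness."]
    else explanations
  PySem.List.slice explanations none (some 3)

-- ===== PRECONDITION & SPEC =====
def Spec_build_opportunity_explanations_py (opportunity_signals : List (List (String × String))) (out : List String) : Prop := out = build_opportunity_explanations_py_alt opportunity_signals
instance (opportunity_signals : List (List (String × String))) (out : List String) : Decidable (Spec_build_opportunity_explanations_py opportunity_signals out) := by unfold Spec_build_opportunity_explanations_py; infer_instance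

-- ===== CLAIM (what is proved, stated in full; the proofs are below) =====
def Claim_equal_build_opportunity_explanations_py : Prop := ∀ (opportunity_signals : List (List (String × String))), Dom_build_opportunity_explanations_py opportunity_signals → Spec_build_opportunity_explanations_py opportunity_signals (build_opportunity_explanations_py opportunity_signals)

-- ===== LEMMAS AND PROOFS =====

-- one inner pass over the rule table marks exactly the indices of the rules the signal triggers
theorem pv_mem_inner (m : PySem.Set Int) (s : List (String × String)) (i : Int) :
    i ∈ (PySem.List.enumerate pvRules).foldl
          (fun m ir =>
            if PySem.Str.isIn ir.2.2.1 (PySem.Str.lower (pvGet s ir.2.1)) then PySem.Set.add m ir.1 else m)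
          m
      ↔ i ∈ m ∨ (i = 0 ∧ PySem.Str.isIn "resilience" (PySem.Str.lower (pvGet s "cluster_tag")))
              ∨ (i = 1 ∧ PySem.Str.isIn "timing" (PySem.Str.lower (pvGet s "cluster_tag")))
              ∨ (i = 2 ∧ PySem.Str.isIn "competitor" (PySem.Str.lower (pvGet s "summary"))) := by
  simp only [pvRules, PySem.List.enumerate, List.foldl]
  split_ifs <;> simp_all [PySem.Set.mem_add] <;> tauto

-- the outer pass over the signals marks exactly the indices of the rules some signal triggers
theorem pv_mem_matched (os : List (List (String × String))) (m : PySem.Set Int) (i : Int) :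
    i ∈ os.foldl
          (fun m s =>
            (PySem.List.enumerate pvRules).foldl
              (fun m ir =>
                if PySem.Str.isIn ir.2.2.1 (PySem.Str.lower (pvGet s ir.2.1)) then PySem.Set.add m ir.1 else m)
              m)
          m
      ↔ i ∈ m ∨ (i = 0 ∧ os.any (fun s => PySem.Str.isIn "resilience" (PySem.Str.lower (pvGet s "cluster_tag"))))
              ∨ (i = 1 ∧ os.any (fun s => PySem.Str.isIn "timing" (PySem.Str.lower (pvGet s "cluster_tag"))))
              ∨ (i = 2 ∧ os.any (fun s => PySem.Str.isIn "competitor" (PySem.Str.lower (pvGet s "summary")))) := by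
  induction os generalizing m with
  | nil => simp
  | cons s t ih =>
    rw [List.foldl_cons, ih, pv_mem_inner]
    simp only [List.any_cons, Bool.or_eq_true]
    generalize (i ∈ m) = P
    generalize (i = 0) = Q0
    generalize (i = 1) = Q1
    generalize (i = 2) = Q2
    generalize (PySem.Str.isIn "resilience" (PySem.Str.lower (pvGet s "cluster_tag")) = true) = A0
    generalize (PySem.Str.isIn "timing" (PySem.Str.lower (pvGet s "cluster_tag")) = true) = A1
    generalize (PySem.Str.isIn "competitor" (PySem.Str.lower (pvGet s "summary")) = true) = A2
    generalize (t.any (fun s => PySem.Str.isIn "resilience" (PySem.Str.lower (pvGet s "cluster_tag"))) = true) = B0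
    generalize (t.any (fun s => PySem.Str.isIn "timing" (PySem.Str.lower (pvGet s "cluster_tag"))) = true) = B1
    generalize (t.any (fun s => PySem.Str.isIn "competitor" (PySem.Str.lower (pvGet s "summary"))) = true) = B2
    tauto

-- the membership test that drives B's filter, in closed form
theorem pv_contains_matched (os : List (List (String × String))) (i : Int) :
    PySem.Set.contains
        (os.foldl
          (fun m s =>
            (PySem.List.enumerate pvRules).foldl
              (fun m ir =>
                if PySem.Str.isIn ir.2.2.1 (PySem.Str.lower (pvGet s ir.2.1)) then PySem.Set.add m ir.1 else m)
              m)
          PySem.Set.empty) i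
      = (decide (i = 0) && os.any (fun s => PySem.Str.isIn "resilience" (PySem.Str.lower (pvGet s "cluster_tag")))
         || decide (i = 1) && os.any (fun s => PySem.Str.isIn "timing" (PySem.Str.lower (pvGet s "cluster_tag")))
         || decide (i = 2) && os.any (fun s => PySem.Str.isIn "competitor" (PySem.Str.lower (pvGet s "summary")))) := by
  rw [← Bool.coe_iff_coe]
  rw [PySem.Set.contains_iff, pv_mem_matched]
  simp only [PySem.Set.empty, List.not_mem_nil, false_or, Bool.or_eq_true, Bool.and_eq_true,
    decide_eq_true_eq, or_assoc]

-- ===== VERDICT (by name: the statement is the Claim_ definition above) =====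
set_option maxHeartbeats 1000000 in
theorem build_opportunity_explanations_py_spec : Claim_equal_build_opportunity_explanations_py := by
  intro os _
  show _ = _
  unfold build_opportunity_explanations_py build_opportunity_explanations_py_alt
  simp only [pv_contains_matched]
  simp only [pvRules, PySem.List.enumerate_cons, PySem.List.enumerate_nil, List.filter_cons,
    List.filter_nil]
  cases h0 : os.any (fun s => PySem.Str.isIn "resilience" (PySem.Str.lower (pvGet s "cluster_tag"))) <;>
  cases h1 : os.any (fun s => PySem.Str.isIn "timing" (PySem.Str.lower (pvGet s "cluster_tag"))) <;>
  cases h2 : os.any (fun s => PySem.Str.isIn "competitor" (PySem.Str.lower (pvGet s "summary"))) <;>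
    simp [h0, h1, h2, PySem.List.slice]
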